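-- pv_equiv track=rewrite | github.com/Anchalsaini28/Anudip-Lab-Solution | Python_Day9_String_Method_Assignment 1.py | count_chars_digits_symbols
-- ===== SOURCE A (Python) =====
-- def count_chars_digits_symbols(input_string):
--     # Initialize counters for letters, digits, and symbols
--     count_letters = 0
--     count_digits = 0
--     count_symbols = 0
--
--     # Iterate through each character in the input string
--     for char in input_string:
--         # Check if the character is a letter (either uppercase or lowercase)
--         if char.isalpha():
--             count_letters += 1
--         # Check if the character is a digit
--         elif char.isdigit():
--             count_digits += 1
--         # If the character is neither a letter nor a digit, it's a symbol
--         else: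
--             count_symbols += 1
--
--     # Return the counts as a tuple
--     return count_letters, count_digits, count_symbols
-- ===== SOURCE B (Python) =====
-- def count_chars_digits_symbols(input_string):
--     # Divide-and-conquer: classify a single character to a unit tuple,
--     # split longer strings in half and add the two sub-counts componentwise.
--     def cat(c):
--         if c.isalpha():
--             return (1, 0, 0)
--         if c.isdigit():
--             return (0, 1, 0)
--         return (0, 0, 1)
--
--     def go(s):
--         if len(s) <= 1:
--             return cat(s[0]) if s else (0, 0, 0)
--         m = len(s) // 2
--         l1, d1, s1 = go(s[:m])
--         l2, d2, s2 = go(s[m:])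
--         return (l1 + l2, d1 + d2, s1 + s2)
--
--     return go(input_string)
-- ===== Notes on version B (the rewrite author's own statement) =====
-- stated objective: alternative
-- what changed: Replaces A's single left-to-right branching loop with three mutable counters by a recursive divide-and-conquer: the string is split in half, each half is counted recursively, and the two count triples are added componentwise; correctness rests on the componentwise additivity of the counts over concatenation.
import Mathlib
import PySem

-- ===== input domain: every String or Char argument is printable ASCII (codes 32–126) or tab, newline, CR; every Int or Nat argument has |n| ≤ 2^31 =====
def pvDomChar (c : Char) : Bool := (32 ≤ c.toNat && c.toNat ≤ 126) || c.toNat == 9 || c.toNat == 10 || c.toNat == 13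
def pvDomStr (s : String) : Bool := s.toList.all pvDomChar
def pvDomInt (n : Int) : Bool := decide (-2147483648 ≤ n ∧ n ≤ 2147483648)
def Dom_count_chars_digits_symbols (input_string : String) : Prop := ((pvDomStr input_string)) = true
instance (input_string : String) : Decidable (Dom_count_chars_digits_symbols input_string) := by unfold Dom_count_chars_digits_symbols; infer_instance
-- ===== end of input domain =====

-- B replaces A's single branching loop with three mutable counters by a recursive
-- divide-and-conquer: split the string in half, count each half, add componentwise
-- (objective: alternative).

-- ===== PORT A =====
-- one pass, three counters, if/elif/else
def count_chars_digits_symbols (input_string : String) : Int × Int × Int :=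
  let r := input_string.toList.foldl
    (fun (acc : Int × Int × Int) c =>
      if PySem.Chars.isalpha c then (acc.1 + 1, acc.2.1, acc.2.2)
      else if PySem.Chars.isdigit c then (acc.1, acc.2.1 + 1, acc.2.2)
      else (acc.1, acc.2.1, acc.2.2 + 1))
    (0, 0, 0)
  r

-- ===== PORT B =====
-- classify a single character
def pvCat (c : Char) : Int × Int × Int :=
  if PySem.Chars.isalpha c then (1, 0, 0)
  else if PySem.Chars.isdigit c then (0, 1, 0)
  else (0, 0, 1)

-- divide and conquer over the character list
def pvGo (l : List Char) : Int × Int × Int :=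
  if h : l.length ≤ 1 then
    match l with
    | [] => (0, 0, 0)
    | c :: _ => pvCat c
  else
    let m := l.length / 2
    let a := pvGo (l.take m)
    let b := pvGo (l.drop m)
    (a.1 + b.1, a.2.1 + b.2.1, a.2.2 + b.2.2)
termination_by l.length
decreasing_by
  · simp only [List.length_take]; omega
  · simp only [List.length_drop]; omega

def count_chars_digits_symbols_alt (input_string : String) : Int × Int × Int :=
  pvGo input_string.toList

-- ===== PRECONDITION & SPEC =====
def Spec_count_chars_digits_symbols (input_string : String) (out : Int × Int × Int) : Prop := out = count_chars_digits_symbols_alt input_string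
instance (input_string : String) (out : Int × Int × Int) : Decidable (Spec_count_chars_digits_symbols input_string out) := by unfold Spec_count_chars_digits_symbols; infer_instance

-- ===== CLAIM (what is proved, stated in full; the proofs are below) =====
def Claim_equal_count_chars_digits_symbols : Prop := ∀ (input_string : String), Dom_count_chars_digits_symbols input_string → Spec_count_chars_digits_symbols input_string (count_chars_digits_symbols input_string)

-- ===== LEMMAS AND PROOFS =====

-- no character is both a letter and a digit
lemma alpha_not_digit (c : Char) (h : PySem.Chars.isalpha c = true) :
    PySem.Chars.isdigit c = false := by
  simp only [PySem.Chars.isalpha, PySem.Chars.isupper, PySem.Chars.islower,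
    PySem.Chars.isdigit, Bool.or_eq_true, Bool.and_eq_true, decide_eq_true_eq] at h ⊢
  rcases h with ⟨h1, h2⟩ | ⟨h1, h2⟩ <;>
    · simp only [Bool.and_eq_false_iff, decide_eq_false_iff_not, Char.le_def,
        UInt32.le_iff_toNat_le] at *
      have k1 : ('9' : Char).val.toNat < ('A' : Char).val.toNat := by decide
      have k2 : ('9' : Char).val.toNat < ('a' : Char).val.toNat := by decide
      omega

-- canonical counts of a character list
def pvCnt (l : List Char) : Int × Int × Int :=
  (((l.filter (fun c => PySem.Chars.isalpha c)).length : Int),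
   ((l.filter (fun c => PySem.Chars.isdigit c)).length : Int),
   ((l.length : Int)
     - ((l.filter (fun c => PySem.Chars.isalpha c)).length : Int)
     - ((l.filter (fun c => PySem.Chars.isdigit c)).length : Int)))

-- fold invariant: A's loop adds the canonical counts onto any start state
lemma foldA_eq (l : List Char) (a b s : Int) :
    l.foldl
      (fun (acc : Int × Int × Int) c =>
        if PySem.Chars.isalpha c then (acc.1 + 1, acc.2.1, acc.2.2)
        else if PySem.Chars.isdigit c then (acc.1, acc.2.1 + 1, acc.2.2)
        else (acc.1, acc.2.1, acc.2.2 + 1))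
      (a, b, s)
    = (a + (pvCnt l).1, b + (pvCnt l).2.1, s + (pvCnt l).2.2) := by
  induction l generalizing a b s with
  | nil => simp [pvCnt]
  | cons c t ih =>
    by_cases ha : PySem.Chars.isalpha c = true
    · have hd := alpha_not_digit c ha
      simp [ha, hd, ih, pvCnt, Prod.ext_iff]
      omega
    · by_cases hd : PySem.Chars.isdigit c = true
      · simp [ha, hd, ih, pvCnt, Prod.ext_iff]
        omega
      · simp [ha, hd, ih, pvCnt, Prod.ext_iff]
        omega

-- the canonical counts are additive over concatenation
lemma pvCnt_append (a b : List Char) :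
    pvCnt (a ++ b) = ((pvCnt a).1 + (pvCnt b).1, (pvCnt a).2.1 + (pvCnt b).2.1,
                      (pvCnt a).2.2 + (pvCnt b).2.2) := by
  simp [pvCnt, List.filter_append, Prod.ext_iff]
  omega

-- B's divide-and-conquer computes the canonical counts
lemma pvGo_eq (l : List Char) : pvGo l = pvCnt l := by
  fun_induction pvGo l with
  | case1 => simp [pvCnt]
  | case2 c t h1 h2 =>
    have ht : t = [] := by
      cases t with
      | nil => rfl
      | cons _ _ => simp at h2
    subst ht
    by_cases ha : PySem.Chars.isalpha c = true
    · have hd := alpha_not_digit c ha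
      simp [pvCat, pvCnt, ha, hd]
    · by_cases hd : PySem.Chars.isdigit c = true
      · simp [pvCat, pvCnt, ha, hd]
      · simp [pvCat, pvCnt, ha, hd]
  | case3 l h m a b ihd iht =>
    have hadd := pvCnt_append (l.take m) (l.drop m)
    rw [List.take_append_drop] at hadd
    show ((pvGo (l.take m)).1 + (pvGo (l.drop m)).1,
          (pvGo (l.take m)).2.1 + (pvGo (l.drop m)).2.1,
          (pvGo (l.take m)).2.2 + (pvGo (l.drop m)).2.2) = pvCnt l
    rw [iht, ihd, hadd]

-- ===== VERDICT (by name: the statement is the Claim_ definition above) =====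
theorem count_chars_digits_symbols_spec : Claim_equal_count_chars_digits_symbols := by
  intro s _
  unfold Spec_count_chars_digits_symbols count_chars_digits_symbols count_chars_digits_symbols_alt
  simp [foldA_eq, pvGo_eq]
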